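-- pv_equiv track=rewrite | github.com/whyj107/CodeWar | 20230828_Reverse sublists of even numbers.py | rev_sub1
-- ===== SOURCE A (Python) =====
-- from itertools import groupby
--
-- def rev_sub1(arr):
--     r = []
--     for i in [list(g) for n,g in groupby(arr, key = lambda x : x%2)]:
--         if i[0]%2:
--             r += i
--         else:
--             r += i[::-1]
--     return r
-- ===== SOURCE B (Python) =====
-- def rev_sub1(arr):
--     n = len(arr)
--     # pass 1: start[i] = index where the maximal run of equal-parity-evens containing i starts
--     # (for odd arr[i] it is i itself)
--     start = [0] * n
--     for i in range(n):
--         start[i] = i if (arr[i] % 2 or i == 0 or arr[i - 1] % 2) else start[i - 1]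
--     # pass 2: end[i] = index where that run ends
--     end = [0] * n
--     for i in range(n - 1, -1, -1):
--         end[i] = i if (arr[i] % 2 or i == n - 1 or arr[i + 1] % 2) else end[i + 1]
--     # each element goes to the position mirrored inside its run
--     return [arr[start[i] + end[i] - i] for i in range(n)]
-- ===== Notes on version B (the rewrite author's own statement) =====
-- stated objective: alternative
-- what changed: Replaces grouping-and-reversing (groupby builds the parity runs, each even run is emitted reversed) by an index-permutation scheme: a forward scan computes per-index run-start, a backward scan per-index run-end, and the output is arr[start[i]+end[i]-i], mirroring every index inside its even run; no group or sublist is ever built or reversed.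
import Mathlib
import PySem

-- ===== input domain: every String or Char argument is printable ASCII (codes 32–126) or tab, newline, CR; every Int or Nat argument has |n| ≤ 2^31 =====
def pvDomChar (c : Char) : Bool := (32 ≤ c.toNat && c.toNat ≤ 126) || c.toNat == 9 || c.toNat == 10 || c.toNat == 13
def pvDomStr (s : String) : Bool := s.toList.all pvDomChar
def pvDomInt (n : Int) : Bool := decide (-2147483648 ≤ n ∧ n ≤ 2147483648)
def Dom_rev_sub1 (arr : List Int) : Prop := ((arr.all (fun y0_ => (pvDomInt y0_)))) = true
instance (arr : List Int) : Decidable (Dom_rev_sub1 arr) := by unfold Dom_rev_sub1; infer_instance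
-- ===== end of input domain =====

-- B replaces A's groupby-and-reverse (build the parity runs, emit even runs reversed) by an
-- index-permutation scheme: two scans compute per-index run-start/run-end and the output is
-- arr[start[i]+end[i]-i]; objective: alternative (same O(n) cost). Both programs are total.

-- ===== PORT A =====
-- itertools.groupby(arr, key=lambda x: x % 2), each group materialised as a list (groups are nonempty)
def pyGroupby2 : List Int → List (List Int)
  | [] => []
  | x :: xs =>
    match pyGroupby2 xs with
    | [] => [[x]]
    | g :: rest =>
      match g with
      | [] => [[x]]   -- unreachable: groups are never empty
      | y :: t =>
        if PySem.Int.mod x 2 = PySem.Int.mod y 2 then (x :: y :: t) :: rest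
        else [x] :: (y :: t) :: rest

def rev_sub1 (arr : List Int) : List Int :=
  (pyGroupby2 arr).foldl
    (fun r i => if PySem.Int.mod (i.headD 0) 2 ≠ 0 then r ++ i else r ++ i.reverse) []

-- ===== PORT B =====
-- start[i] filled left to right (the loop body appends one entry per i; it reads only arr[i],
-- arr[i-1] and the entry written at i-1; Python's short-circuit guards `i == 0` / `i == n-1`
-- make the neighbour lookups irrelevant at the ends, so a total getD with default 0 is exact)
def mkStart (arr : List Int) : List Int :=
  (List.range arr.length).foldl
    (fun s i =>
      s ++ [if PySem.Int.mod (arr.getD i 0) 2 ≠ 0 ∨ i = 0 ∨ PySem.Int.mod (arr.getD (i - 1) 0) 2 ≠ 0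
            then (i : Int) else s.getD (i - 1) 0]) []

-- end[i] filled right to left (for i in range(n-1, -1, -1)): foldr over range n visits the
-- indices descending and prepends, so the head of the accumulator is the entry at i+1
def mkEnd (arr : List Int) : List Int :=
  (List.range arr.length).foldr
    (fun i e =>
      (if PySem.Int.mod (arr.getD i 0) 2 ≠ 0 ∨ i = arr.length - 1 ∨ PySem.Int.mod (arr.getD (i + 1) 0) 2 ≠ 0
       then (i : Int) else e.headD 0) :: e) []

def rev_sub1_alt (arr : List Int) : List Int :=
  (List.range arr.length).map
    (fun i => PySem.List.pyGetD arr ((mkStart arr).getD i 0 + (mkEnd arr).getD i 0 - (i : Int)) 0)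

-- ===== PRECONDITION & SPEC =====
def Spec_rev_sub1 (arr : List Int) (out : List Int) : Prop := out = rev_sub1_alt arr
instance (arr : List Int) (out : List Int) : Decidable (Spec_rev_sub1 arr out) := by unfold Spec_rev_sub1; infer_instance

-- ===== CLAIM (what is proved, stated in full; the proofs are below) =====
def Claim_equal_rev_sub1 : Prop := ∀ (arr : List Int), Dom_rev_sub1 arr → Spec_rev_sub1 arr (rev_sub1 arr)

-- ===== LEMMAS AND PROOFS =====

theorem pymod2 (x : Int) : PySem.Int.mod x 2 = x % 2 :=
  PySem.Int.mod_eq_emod_of_pos (by omega)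

-- ---------- generic list facts specialised to our programs ----------

theorem getD_append_add (l l' : List Int) (j : Nat) (d : Int) :
    (l ++ l').getD (l.length + j) d = l'.getD j d := by
  simp [List.getD_eq_getElem?_getD, List.getElem?_append_right]

theorem getD_append_lt (l l' : List Int) (j : Nat) (d : Int) (h : j < l.length) :
    (l ++ l').getD j d = l.getD j d := by
  simp [List.getD_eq_getElem?_getD, List.getElem?_append_left h]

theorem getD_map_lt (l : List Int) (f : Int → Int) (j : Nat) (d : Int) (h : j < l.length) :
    (l.map f).getD j d = f (l.getD j d) := by
  simp [List.getD_eq_getElem?_getD, h, List.getElem?_eq_getElem]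

theorem getD_eq_headD_drop (l : List Int) (j : Nat) (d : Int) :
    l.getD j d = (l.drop j).headD d := by
  induction l generalizing j with
  | nil => simp
  | cons a t ih => cases j with
    | zero => simp
    | succ j => simpa using ih j

theorem map_range_rev (l : List Int) :
    (List.range l.length).map (fun i => l.getD (l.length - 1 - i) 0) = l.reverse := by
  apply List.ext_getElem
  · simp
  · intro j h1 h2
    simp only [List.getElem_map, List.getElem_range, List.getElem_reverse]
    simp only [List.length_map, List.length_range] at h1
    rw [List.getD_eq_getElem?_getD, List.getElem?_eq_getElem (by omega)]
    simp

theorem pyGetD_append_shift (v : Int) (p l : List Int) (h : 0 ≤ v) :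
    PySem.List.pyGetD (p ++ l) (v + (p.length : Int)) 0 = PySem.List.pyGetD l v 0 := by
  lift v to Nat using h
  rw [show ((v : Int) + (p.length : Int)) = ((v + p.length : Nat) : Int) by push_cast; ring]
  rw [PySem.List.pyGetD_natCast, PySem.List.pyGetD_natCast, Nat.add_comm]
  exact getD_append_add p l v 0

-- ---------- A-side: groupby characterised by the run recursion gAux ----------

-- reference run-recursion (buffer of the current even run)
def gAux : List Int → List Int → List Int
  | buf, [] => buf.reverse
  | buf, x :: xs =>
    if PySem.Int.mod x 2 = 0 then gAux (buf ++ [x]) xs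
    else buf.reverse ++ x :: gAux [] xs

def emit2 (i : List Int) : List Int :=
  if PySem.Int.mod (i.headD 0) 2 ≠ 0 then i else i.reverse

theorem gb_cons (x : Int) (xs : List Int) :
    pyGroupby2 (x :: xs) =
      match pyGroupby2 xs with
      | [] => [[x]]
      | g :: rest =>
        match g with
        | [] => [[x]]
        | y :: t =>
          if PySem.Int.mod x 2 = PySem.Int.mod y 2 then (x :: y :: t) :: rest
          else [x] :: (y :: t) :: rest := rfl

theorem foldA (gs : List (List Int)) (r : List Int) :
    gs.foldl (fun r i => if PySem.Int.mod (i.headD 0) 2 ≠ 0 then r ++ i else r ++ i.reverse) r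
      = r ++ (gs.map emit2).flatten := by
  induction gs generalizing r with
  | nil => simp
  | cons g gs ih =>
    simp only [List.foldl_cons, List.map_cons, List.flatten_cons, ih, emit2]
    split_ifs <;> simp

theorem gb_head (x : Int) (xs : List Int) :
    ∃ t rest, pyGroupby2 (x :: xs) = (x :: t) :: rest := by
  induction xs generalizing x with
  | nil => exact ⟨[], [], rfl⟩
  | cons y ys ih =>
    obtain ⟨t, rest, h⟩ := ih y
    rw [gb_cons x (y :: ys), h]
    by_cases hp : PySem.Int.mod x 2 = PySem.Int.mod y 2
    · exact ⟨y :: t, rest, by dsimp only; rw [if_pos hp]⟩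
    · exact ⟨[], (y :: t) :: rest, by dsimp only; rw [if_neg hp]⟩

theorem gb_even_run (b : List Int) (hne : b ≠ [])
    (hb : ∀ z ∈ b, z % 2 = 0) : pyGroupby2 b = [b] := by
  induction b with
  | nil => simp at hne
  | cons z b ih =>
    cases b with
    | nil => rfl
    | cons w b' =>
      have h := ih (by simp) (fun u hu => hb u (List.mem_cons_of_mem _ hu))
      have hzw : PySem.Int.mod z 2 = PySem.Int.mod w 2 := by
        rw [pymod2, pymod2, hb z (by simp), hb w (by simp)]
      rw [gb_cons z (w :: b'), h]; dsimp only; rw [if_pos hzw]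

theorem gb_run_odd (b : List Int) (x : Int) (xs : List Int) (hne : b ≠ [])
    (hb : ∀ z ∈ b, z % 2 = 0) (hx : x % 2 = 1) :
    pyGroupby2 (b ++ x :: xs) = b :: pyGroupby2 (x :: xs) := by
  induction b with
  | nil => simp at hne
  | cons z b ih =>
    have hz : z % 2 = 0 := hb z (by simp)
    cases b with
    | nil =>
      obtain ⟨t, rest, h⟩ := gb_head x xs
      have hne' : ¬ PySem.Int.mod z 2 = PySem.Int.mod x 2 := by
        rw [pymod2, pymod2, hz, hx]; decide
      rw [List.singleton_append, gb_cons z (x :: xs), h]; dsimp only; rw [if_neg hne', ← h]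
    | cons w b' =>
      have h := ih (by simp) (fun u hu => hb u (List.mem_cons_of_mem _ hu))
      have hzw : PySem.Int.mod z 2 = PySem.Int.mod w 2 := by
        rw [pymod2, pymod2, hz, hb w (by simp)]
      simp only [List.cons_append] at h ⊢
      rw [gb_cons z (w :: (b' ++ x :: xs)), h]; dsimp only; rw [if_pos hzw]

theorem emit2_odd (y : Int) (t : List Int) (hy : y % 2 = 1) : emit2 (y :: t) = y :: t := by
  rw [emit2, if_pos]; simp [hy]

theorem emit2_even (y : Int) (t : List Int) (hy : y % 2 = 0) :
    emit2 (y :: t) = (y :: t).reverse := by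
  rw [emit2, if_neg]; simp [hy]

theorem emit_flat_odd (x : Int) (xs : List Int) (hx : x % 2 = 1) :
    ((pyGroupby2 (x :: xs)).map emit2).flatten
      = x :: ((pyGroupby2 xs).map emit2).flatten := by
  cases xs with
  | nil => simp [pyGroupby2, emit2_odd x [] hx]
  | cons y ys =>
    obtain ⟨t, rest, h⟩ := gb_head y ys
    rw [gb_cons x (y :: ys), h]
    dsimp only
    by_cases hp : PySem.Int.mod x 2 = PySem.Int.mod y 2
    · have hy : y % 2 = 1 := by rw [pymod2, pymod2, hx] at hp; omega
      rw [if_pos hp]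
      simp [emit2_odd _ _ hx, emit2_odd _ _ hy]
    · rw [if_neg hp]
      simp [emit2_odd _ _ hx]

theorem gb_gAux (xs : List Int) : ∀ b, (∀ z ∈ b, z % 2 = 0) →
    ((pyGroupby2 (b ++ xs)).map emit2).flatten = gAux b xs := by
  induction xs with
  | nil =>
    intro b hb
    cases b with
    | nil => simp [pyGroupby2, gAux]
    | cons z b' =>
      rw [List.append_nil, gb_even_run (z :: b') (by simp) hb]
      rw [show gAux (z :: b') [] = (z :: b').reverse from rfl]
      simp [emit2_even z b' (hb z (by simp))]
  | cons x xs ih =>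
    intro b hb
    have hcase : x % 2 = 0 ∨ x % 2 = 1 := by omega
    rcases hcase with hx | hx
    · have heq : b ++ x :: xs = (b ++ [x]) ++ xs := by simp
      rw [heq, ih (b ++ [x]) ?_]
      · rw [show gAux b (x :: xs) = gAux (b ++ [x]) xs from by
          rw [gAux, if_pos (by rw [pymod2, hx])]]
      · intro z hz
        rcases List.mem_append.mp hz with h | h
        · exact hb z h
        · simp only [List.mem_singleton] at h; subst h; exact hx
    · have hgx : gAux b (x :: xs) = b.reverse ++ x :: gAux [] xs := by
        rw [gAux, if_neg (by rw [pymod2, hx]; decide)]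
      have h0 := ih [] (by simp)
      simp only [List.nil_append] at h0
      cases b with
      | nil =>
        rw [List.nil_append, emit_flat_odd x xs hx, h0, hgx]
        simp
      | cons z b' =>
        rw [gb_run_odd (z :: b') x xs (by simp) hb hx, hgx]
        simp only [List.map_cons, List.flatten_cons, emit_flat_odd x xs hx, h0]
        rw [emit2_even z b' (hb z (by simp))]

theorem A_eq_gAux (arr : List Int) : rev_sub1 arr = gAux [] arr := by
  have h := gb_gAux arr [] (by simp)
  simp only [List.nil_append] at h
  rw [rev_sub1, foldA, List.nil_append, h]

theorem gAux_even (b : List Int) (hb : ∀ z ∈ b, z % 2 = 0) :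
    ∀ c, gAux c b = b.reverse ++ c.reverse := by
  induction b with
  | nil => intro c; simp [gAux]
  | cons z b ih =>
    intro c
    rw [gAux, if_pos (by rw [pymod2, hb z (by simp)]),
        ih (fun u hu => hb u (List.mem_cons_of_mem _ hu))]
    simp

theorem gAux_evenPrefix (b : List Int) (hb : ∀ z ∈ b, z % 2 = 0) :
    ∀ c l, gAux c (b ++ l) = gAux (c ++ b) l := by
  induction b with
  | nil => intro c l; simp
  | cons z b ih =>
    intro c l
    rw [List.cons_append, gAux, if_pos (by rw [pymod2, hb z (by simp)]),
        ih (fun u hu => hb u (List.mem_cons_of_mem _ hu))]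
    simp

theorem gAux_odd (x : Int) (xs c : List Int) (hx : ¬ x % 2 = 0) :
    gAux c (x :: xs) = c.reverse ++ x :: gAux [] xs := by
  rw [gAux, if_neg (by rw [pymod2]; exact hx)]

-- ---------- B-side: the two scans characterised by clean recursions ----------

-- start built left to right: sTake arr j is the fold over range j
def sStep (arr : List Int) (s : List Int) (i : Nat) : List Int :=
  s ++ [if PySem.Int.mod (arr.getD i 0) 2 ≠ 0 ∨ i = 0 ∨ PySem.Int.mod (arr.getD (i - 1) 0) 2 ≠ 0
        then (i : Int) else s.getD (i - 1) 0]

def sTake (arr : List Int) : Nat → List Int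
  | 0 => []
  | j + 1 => sStep arr (sTake arr j) j

theorem mkStart_eq_sTake (arr : List Int) : mkStart arr = sTake arr arr.length := by
  suffices h : ∀ j, (List.range j).foldl
      (fun s i =>
        s ++ [if PySem.Int.mod (arr.getD i 0) 2 ≠ 0 ∨ i = 0 ∨ PySem.Int.mod (arr.getD (i - 1) 0) 2 ≠ 0
              then (i : Int) else s.getD (i - 1) 0]) [] = sTake arr j by
    exact h arr.length
  intro j
  induction j with
  | zero => rfl
  | succ j ih => rw [List.range_succ, List.foldl_append, ih]; rfl

theorem len_sTake (arr : List Int) : ∀ j, (sTake arr j).length = j := by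
  intro j
  induction j with
  | zero => rfl
  | succ j ih => simp [sTake, sStep, ih]

-- end built right to left: eRec, with indices relative to its argument
def eRec : List Int → List Int
  | [] => []
  | a :: l =>
    (if a % 2 ≠ 0 ∨ l = [] ∨ (l.headD 0) % 2 ≠ 0 then (0 : Int) else (eRec l).headD 0 + 1)
      :: (eRec l).map (· + 1)

theorem len_eRec : ∀ l : List Int, (eRec l).length = l.length := by
  intro l
  induction l with
  | nil => rfl
  | cons a l ih => simp [eRec, ih]

theorem eRec_ne_nil (l : List Int) (h : l ≠ []) : eRec l ≠ [] := by
  intro hc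
  have := len_eRec l
  rw [hc] at this
  exact h (List.length_eq_zero_iff.mp this.symm)

theorem mkEnd_drop (arr : List Int) :
    ∀ m k, arr.length - k = m →
      ((List.range m).map (fun x => x + k)).foldr
        (fun i e =>
          (if PySem.Int.mod (arr.getD i 0) 2 ≠ 0 ∨ i = arr.length - 1 ∨ PySem.Int.mod (arr.getD (i + 1) 0) 2 ≠ 0
           then (i : Int) else e.headD 0) :: e) []
      = (eRec (arr.drop k)).map (· + (k : Int)) := by
  intro m
  induction m with
  | zero =>
    intro k hk
    have : arr.drop k = [] := List.drop_eq_nil_iff.mpr (by omega)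
    simp [this, eRec]
  | succ m ih =>
    intro k hk
    have hklt : k < arr.length := by omega
    have hrange : List.range (m + 1) = 0 :: (List.range m).map (fun x => x + 1) := by
      rw [List.range_succ_eq_map]
    rw [hrange]
    simp only [List.map_cons, List.map_map, List.foldr_cons, Nat.zero_add]
    have hcomp : ((fun x => x + k) ∘ fun x => x + 1) = (fun x => x + (k + 1)) := by
      funext x; simp [Function.comp]; omega
    rw [hcomp, ih (k + 1) (by omega)]
    have hdk : arr.drop k = arr[k] :: arr.drop (k + 1) := List.drop_eq_getElem_cons hklt
    set t := arr.drop (k + 1) with ht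
    have hak : arr.getD k 0 = arr[k] := by
      rw [List.getD_eq_getElem?_getD, List.getElem?_eq_getElem hklt]; rfl
    have hak1 : arr.getD (k + 1) 0 = t.headD 0 := by
      rw [ht, ← getD_eq_headD_drop]
    have hlast : (k = arr.length - 1) ↔ t = [] := by
      rw [ht, List.drop_eq_nil_iff]; omega
    rw [hdk]
    show _ = ((eRec (arr[k] :: t))).map (· + (k : Int))
    rw [eRec]
    simp only [List.map_cons, List.map_map]
    have hcomp2 : ((· + (k : Int)) ∘ (· + (1 : Int))) = (· + ((k : Int) + 1)) := by
      funext x; simp [Function.comp]; ring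
    rw [hcomp2]
    have htail : List.map (fun x => x + (((k + 1 : Nat)) : Int)) (eRec t)
        = List.map (fun x => x + ((k : Int) + 1)) (eRec t) := by
      push_cast; rfl
    rw [htail]
    congr 1
    -- the head entries agree
    rw [pymod2, pymod2, hak, hak1]
    by_cases hc : ¬ arr[k] % 2 = 0 ∨ t = [] ∨ ¬ (t.headD 0) % 2 = 0
    · rw [if_pos ?_, if_pos hc]
      · simp
      · rcases hc with h | h | h
        · exact Or.inl h
        · exact Or.inr (Or.inl (hlast.mpr h))
        · exact Or.inr (Or.inr h)
    · push_neg at hc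
      obtain ⟨h1, h2, h3⟩ := hc
      rw [if_neg ?_, if_neg (by push_neg; exact ⟨h1, h2, h3⟩)]
      · have hne : eRec t ≠ [] := eRec_ne_nil t h2
        cases he : eRec t with
        | nil => exact absurd he hne
        | cons a l => simp [he]; push_cast; ring
      · push_neg
        exact ⟨h1, fun hk' => absurd (hlast.mp hk') h2, h3⟩

theorem mkEnd_eq_eRec (arr : List Int) : mkEnd arr = eRec arr := by
  have h := mkEnd_drop arr arr.length 0 (by omega)
  simp only [List.drop_zero, Nat.cast_zero] at h
  have hmap : (List.range arr.length).map (fun x => x + 0) = List.range arr.length := by simp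
  rw [hmap] at h
  have hmap2 : (eRec arr).map (· + (0 : Int)) = eRec arr := by simp
  rw [hmap2] at h
  exact h

-- ---------- bounds on the scan entries ----------

theorem getD_nonneg_of_mem (l : List Int) (h : ∀ z ∈ l, 0 ≤ z) (i : Nat) :
    0 ≤ l.getD i 0 := by
  rcases Nat.lt_or_ge i l.length with hi | hi
  · rw [List.getD_eq_getElem?_getD, List.getElem?_eq_getElem hi]
    exact h _ (List.getElem_mem _)
  · rw [List.getD_eq_getElem?_getD, List.getElem?_eq_none (by omega)]
    simp

theorem sTake_mem_nonneg (arr : List Int) : ∀ j, ∀ z ∈ sTake arr j, 0 ≤ z := by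
  intro j
  induction j with
  | zero => intro z hz; simp [sTake] at hz
  | succ j ih =>
    intro z hz
    rw [sTake, sStep] at hz
    rcases List.mem_append.mp hz with h | h
    · exact ih z h
    · simp only [List.mem_singleton] at h
      subst h
      split_ifs
      · positivity
      · exact getD_nonneg_of_mem _ ih _

theorem sTake_nonneg (arr : List Int) (j i : Nat) : 0 ≤ (sTake arr j).getD i 0 :=
  getD_nonneg_of_mem _ (sTake_mem_nonneg arr j) i

theorem eRec_ge (l : List Int) : ∀ i, i < l.length → (i : Int) ≤ (eRec l).getD i 0 := by
  induction l with
  | nil => intro i h; simp at h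
  | cons a t ih =>
    intro i h
    cases i with
    | zero =>
      rw [eRec]
      simp only [List.getD_cons_zero, Nat.cast_zero]
      split_ifs
      · exact le_refl 0
      · have hhd : (eRec t).headD 0 = (eRec t).getD 0 0 := by
          cases eRec t <;> simp
        rw [hhd]
        have h0 : (0 : Int) ≤ (eRec t).getD 0 0 := by
          rcases Nat.eq_zero_or_pos t.length with ht | ht
          · rw [List.getD_eq_getElem?_getD, List.getElem?_eq_none (by rw [len_eRec]; omega)]
            simp
          · simpa using ih 0 (by omega)
        omega
    | succ i =>
      rw [eRec]
      simp only [List.getD_cons_succ]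
      have hi : i < t.length := by simpa using h
      rw [getD_map_lt _ _ i _ (by rw [len_eRec]; exact hi)]
      have := ih i hi
      push_cast
      omega

-- ---------- run decomposition of the two scans ----------

theorem getD_replicate_zero (j i : Nat) : (List.replicate j (0 : Int)).getD i 0 = 0 := by
  rw [List.getD_eq_getElem?_getD, List.getElem?_replicate]
  split <;> rfl

theorem sTake_even (b : List Int) (hb : ∀ z ∈ b, z % 2 = 0) (r : List Int) :
    ∀ j, j ≤ b.length → sTake (b ++ r) j = List.replicate j 0 := by
  intro j
  induction j with
  | zero => intro _; rfl
  | succ j ih =>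
    intro hj
    have hjb : j < b.length := by omega
    rw [sTake, ih (by omega), sStep]
    have hbj : (b ++ r).getD j 0 = b.getD j 0 := getD_append_lt _ _ _ _ hjb
    have hbjval : b.getD j 0 % 2 = 0 := by
      rw [List.getD_eq_getElem?_getD, List.getElem?_eq_getElem hjb]
      exact hb _ (List.getElem_mem _)
    by_cases hj0 : j = 0
    · subst hj0
      rw [if_pos (Or.inr (Or.inl rfl))]
      simp [List.replicate]
    · have hj1 : j - 1 < b.length := by omega
      have hbj1 : (b ++ r).getD (j - 1) 0 = b.getD (j - 1) 0 := getD_append_lt _ _ _ _ hj1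
      have hbj1val : b.getD (j - 1) 0 % 2 = 0 := by
        rw [List.getD_eq_getElem?_getD, List.getElem?_eq_getElem hj1]
        exact hb _ (List.getElem_mem _)
      rw [if_neg ?_]
      · rw [getD_replicate_zero, ← List.replicate_succ']
      · push_neg
        refine ⟨?_, hj0, ?_⟩
        · rw [pymod2, hbj, hbjval]
        · rw [pymod2, hbj1, hbj1val]

theorem sTake_odd (b : List Int) (x : Int) (xs : List Int)
    (hb : ∀ z ∈ b, z % 2 = 0) (hx : ¬ x % 2 = 0) :
    ∀ j, j ≤ xs.length →
      sTake (b ++ x :: xs) (b.length + 1 + j)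
        = (List.replicate b.length 0 ++ [(b.length : Int)])
            ++ (sTake xs j).map (· + ((b.length : Int) + 1)) := by
  intro j
  induction j with
  | zero =>
    intro _
    rw [show b.length + 1 + 0 = b.length + 1 from rfl,
        show sTake (b ++ x :: xs) (b.length + 1)
          = sStep (b ++ x :: xs) (sTake (b ++ x :: xs) b.length) b.length from rfl,
        sTake_even b hb (x :: xs) b.length (le_refl _), sStep]
    have hgx : (b ++ x :: xs).getD b.length 0 = x := by
      have h0 := getD_append_add b (x :: xs) 0 0
      simpa using h0
    rw [if_pos (Or.inl (by rw [pymod2, hgx]; exact hx))]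
    have hlr : (List.replicate b.length (0 : Int)).length = b.length := by simp
    rw [show (b.length : Int) = ((List.replicate b.length (0 : Int)).length : Int) by rw [hlr]]
    simp [sTake]
  | succ j ih =>
    intro hj
    have hjx : j < xs.length := by omega
    rw [show b.length + 1 + (j + 1) = (b.length + 1 + j) + 1 by omega,
        show sTake (b ++ x :: xs) ((b.length + 1 + j) + 1)
          = sStep (b ++ x :: xs) (sTake (b ++ x :: xs) (b.length + 1 + j)) (b.length + 1 + j) from rfl,
        ih (by omega), sStep]
    set P : List Int := List.replicate b.length 0 ++ [(b.length : Int)] with hP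
    have hPlen : P.length = b.length + 1 := by simp [hP]
    -- the scanned element and its left neighbour in the full list
    have hgi : (b ++ x :: xs).getD (b.length + 1 + j) 0 = xs.getD j 0 := by
      have h0 := getD_append_add b (x :: xs) (j + 1) 0
      rw [show b.length + 1 + j = b.length + (j + 1) by omega, h0]
      simp
    rw [show sTake xs (j + 1) = sStep xs (sTake xs j) j from rfl, sStep]
    by_cases hj0 : j = 0
    · subst hj0
      have hgi1 : (b ++ x :: xs).getD (b.length + 1 + 0 - 1) 0 = x := by
        have h0 := getD_append_add b (x :: xs) 0 0
        rw [show b.length + 1 + 0 - 1 = b.length + 0 by omega, h0]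
        simp
      rw [if_pos (Or.inr (Or.inr (by rw [pymod2, hgi1]; exact hx))),
          if_pos (Or.inr (Or.inl rfl))]
      simp only [sTake, List.map_append, List.map_cons, List.map_nil, List.append_assoc]
      congr 2
      push_cast; ring
    · have hgi1 : (b ++ x :: xs).getD (b.length + 1 + j - 1) 0 = xs.getD (j - 1) 0 := by
        have h0 := getD_append_add b (x :: xs) (1 + (j - 1)) 0
        rw [show b.length + 1 + j - 1 = b.length + (1 + (j - 1)) by omega, h0]
        simp [show 1 + (j - 1) = j - 1 + 1 by omega]
      by_cases hc : ¬ xs.getD j 0 % 2 = 0 ∨ ¬ xs.getD (j - 1) 0 % 2 = 0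
      · rw [if_pos ?_, if_pos ?_]
        · simp only [List.map_append, List.map_cons, List.map_nil, List.append_assoc]
          congr 3
          push_cast; ring
        · rcases hc with h | h
          · exact Or.inl (by rw [pymod2]; exact h)
          · exact Or.inr (Or.inr (by rw [pymod2]; exact h))
        · rcases hc with h | h
          · exact Or.inl (by rw [pymod2, hgi]; exact h)
          · exact Or.inr (Or.inr (by rw [pymod2, hgi1]; exact h))
      · push_neg at hc
        obtain ⟨h1, h2⟩ := hc
        rw [if_neg ?_, if_neg ?_]
        · simp only [List.map_append, List.map_cons, List.map_nil, List.append_assoc]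
          congr 3
          have hidx : b.length + 1 + j - 1 = P.length + (j - 1) := by rw [hPlen]; omega
          rw [hidx, getD_append_add P _ (j - 1) 0,
              getD_map_lt _ _ _ _ (by rw [len_sTake]; omega)]
        · push_neg
          exact ⟨by rw [pymod2]; simpa using h1, hj0, by rw [pymod2]; simpa using h2⟩
        · push_neg
          refine ⟨by rw [pymod2, hgi]; simpa using h1, by omega,
                  by rw [pymod2, hgi1]; simpa using h2⟩

theorem eRec_even (b : List Int) (hb : ∀ z ∈ b, z % 2 = 0) :
    eRec b = List.replicate b.length ((b.length : Int) - 1) := by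
  induction b with
  | nil => rfl
  | cons a t ih =>
    have ht := ih (fun u hu => hb u (List.mem_cons_of_mem _ hu))
    cases t with
    | nil =>
      rw [eRec, if_pos (Or.inr (Or.inl rfl))]
      simp [eRec]
    | cons w t' =>
      rw [eRec, if_neg ?_]
      · rw [ht]
        simp only [List.length_cons, List.replicate_succ, List.headD_cons, List.map_cons,
          List.map_replicate]
        push_cast
        ring_nf
      · push_neg
        refine ⟨by simpa using hb a (by simp), by simp, ?_⟩
        simpa using hb w (by simp)

theorem eRec_odd (b : List Int) (x : Int) (xs : List Int)
    (hb : ∀ z ∈ b, z % 2 = 0) (hx : ¬ x % 2 = 0) :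
    eRec (b ++ x :: xs)
      = List.replicate b.length ((b.length : Int) - 1)
        ++ (b.length : Int) :: (eRec xs).map (· + ((b.length : Int) + 1)) := by
  induction b with
  | nil =>
    rw [List.nil_append, eRec, if_pos (Or.inl (by simpa using hx))]
    simp only [List.length_nil, List.replicate_zero, List.nil_append, Nat.cast_zero]
    push_cast
    ring_nf
  | cons a b' ih =>
    have hib := ih (fun u hu => hb u (List.mem_cons_of_mem _ hu))
    rw [List.cons_append, eRec, hib]
    cases b' with
    | nil =>
      rw [if_pos (Or.inr (Or.inr (by simpa using hx)))]
      simp only [List.length_nil, List.replicate_zero, List.nil_append, Nat.cast_zero,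
        List.length_cons, List.replicate_succ, List.map_cons, List.map_map]
      push_cast
      simp only [Function.comp_def]
      try ring_nf
      try rfl
    | cons w t' =>
      rw [if_neg ?_]
      · simp only [List.length_cons, List.replicate_succ, List.headD_cons, List.map_cons,
          List.map_append, List.map_replicate, List.map_map, List.cons_append]
        push_cast
        simp only [Function.comp_def]
        try ring_nf
        try rfl
      · push_neg
        refine ⟨by simpa using hb a (by simp), by simp, by simpa using hb w (by simp)⟩
-- main assembly
theorem getD_replicate_in (n i : Nat) (v : Int) (h : i < n) :
    (List.replicate n v).getD i 0 = v := by
  rw [List.getD_eq_getElem?_getD, List.getElem?_replicate, if_pos h]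
  rfl

theorem len_mkEnd (arr : List Int) : (mkEnd arr).length = arr.length := by
  rw [mkEnd_eq_eRec, len_eRec]

theorem alt_even (arr : List Int) (hb : ∀ z ∈ arr, z % 2 = 0) :
    rev_sub1_alt arr = arr.reverse := by
  have h1 := sTake_even arr hb [] arr.length (le_refl _)
  rw [List.append_nil] at h1
  have hs : mkStart arr = List.replicate arr.length 0 := by
    rw [mkStart_eq_sTake, h1]
  have he : mkEnd arr = List.replicate arr.length ((arr.length : Int) - 1) := by
    rw [mkEnd_eq_eRec, eRec_even arr hb]
  rw [rev_sub1_alt, hs, he, ← map_range_rev arr]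
  apply List.map_congr_left
  intro i hi
  have hin : i < arr.length := List.mem_range.mp hi
  rw [getD_replicate_zero, getD_replicate_in _ _ _ hin,
      show (0 + ((arr.length : Int) - 1) - (i : Int)) = ((arr.length - 1 - i : Nat) : Int) by omega,
      PySem.List.pyGetD_natCast]

theorem alt_odd (b : List Int) (x : Int) (xs : List Int)
    (hb : ∀ z ∈ b, z % 2 = 0) (hx : ¬ x % 2 = 0) :
    rev_sub1_alt (b ++ x :: xs) = b.reverse ++ x :: rev_sub1_alt xs := by
  have hlen : (b ++ x :: xs).length = b.length + 1 + xs.length := by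
    simp; omega
  have hs : mkStart (b ++ x :: xs)
      = (List.replicate b.length 0 ++ [(b.length : Int)])
          ++ (mkStart xs).map (· + ((b.length : Int) + 1)) := by
    rw [mkStart_eq_sTake, hlen, sTake_odd b x xs hb hx xs.length (le_refl _),
        ← mkStart_eq_sTake]
  have he : mkEnd (b ++ x :: xs)
      = List.replicate b.length ((b.length : Int) - 1)
          ++ (b.length : Int) :: (mkEnd xs).map (· + ((b.length : Int) + 1)) := by
    rw [mkEnd_eq_eRec, eRec_odd b x xs hb hx, ← mkEnd_eq_eRec]
  rw [rev_sub1_alt, hs, he, hlen,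
      show b.length + 1 + xs.length = (b.length + 1) + xs.length from rfl,
      List.range_add, List.range_succ, List.map_append, List.map_append,
      show b.reverse ++ x :: rev_sub1_alt xs = (b.reverse ++ [x]) ++ rev_sub1_alt xs by simp]
  congr 1
  · -- the first two segments: the reversed even run, then [x]
    congr 1
    · -- reversed run
      rw [← map_range_rev b]
      apply List.map_congr_left
      intro i hi
      have hin : i < b.length := List.mem_range.mp hi
      have hsg : ((List.replicate b.length (0 : Int) ++ [(b.length : Int)])
          ++ (mkStart xs).map (· + ((b.length : Int) + 1))).getD i 0 = 0 := by
        rw [getD_append_lt _ _ _ _ (by simp; omega), getD_append_lt _ _ _ _ (by simp; omega),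
            getD_replicate_zero]
      have heg : (List.replicate b.length ((b.length : Int) - 1)
          ++ (b.length : Int) :: (mkEnd xs).map (· + ((b.length : Int) + 1))).getD i 0
            = (b.length : Int) - 1 := by
        rw [getD_append_lt _ _ _ _ (by simp; omega), getD_replicate_in _ _ _ hin]
      rw [hsg, heg,
          show (0 + ((b.length : Int) - 1) - (i : Int)) = ((b.length - 1 - i : Nat) : Int) by omega,
          PySem.List.pyGetD_natCast,
          getD_append_lt _ _ _ _ (by omega)]
    · -- the singleton [x]
      simp only [List.map_cons, List.map_nil]
      have hsg : ((List.replicate b.length (0 : Int) ++ [(b.length : Int)])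
          ++ (mkStart xs).map (· + ((b.length : Int) + 1))).getD b.length 0
            = (b.length : Int) := by
        rw [getD_append_lt _ _ _ _ (by simp)]
        have h0 := getD_append_add (List.replicate b.length (0 : Int)) [(b.length : Int)] 0 0
        simpa using h0
      have heg : (List.replicate b.length ((b.length : Int) - 1)
          ++ (b.length : Int) :: (mkEnd xs).map (· + ((b.length : Int) + 1))).getD b.length 0
            = (b.length : Int) := by
        have h0 := getD_append_add (List.replicate b.length ((b.length : Int) - 1))
          ((b.length : Int) :: (mkEnd xs).map (· + ((b.length : Int) + 1))) 0 0
        simpa using h0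
      have hgx : (b ++ x :: xs).getD b.length 0 = x := by
        have h0 := getD_append_add b (x :: xs) 0 0
        simpa using h0
      rw [hsg, heg,
          show ((b.length : Int) + (b.length : Int) - (b.length : Int)) = ((b.length : Nat) : Int) by omega,
          PySem.List.pyGetD_natCast, hgx]
  · -- the tail segment is rev_sub1_alt xs, index-shifted
    rw [rev_sub1_alt, List.map_map]
    apply List.map_congr_left
    intro j hj
    have hjx : j < xs.length := List.mem_range.mp hj
    simp only [Function.comp]
    have hsg : ((List.replicate b.length (0 : Int) ++ [(b.length : Int)])
        ++ (mkStart xs).map (· + ((b.length : Int) + 1))).getD (b.length + 1 + j) 0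
          = (mkStart xs).getD j 0 + ((b.length : Int) + 1) := by
      have h0 := getD_append_add (List.replicate b.length (0 : Int) ++ [(b.length : Int)])
        ((mkStart xs).map (· + ((b.length : Int) + 1))) j 0
      rw [show (List.replicate b.length (0 : Int) ++ [(b.length : Int)]).length + j
            = b.length + 1 + j by simp] at h0
      rw [h0, getD_map_lt _ _ _ _ (by rw [mkStart_eq_sTake, len_sTake]; exact hjx)]
    have heg : (List.replicate b.length ((b.length : Int) - 1)
        ++ (b.length : Int) :: (mkEnd xs).map (· + ((b.length : Int) + 1))).getD (b.length + 1 + j) 0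
          = (mkEnd xs).getD j 0 + ((b.length : Int) + 1) := by
      have h0 := getD_append_add (List.replicate b.length ((b.length : Int) - 1))
        ((b.length : Int) :: (mkEnd xs).map (· + ((b.length : Int) + 1))) (j + 1) 0
      rw [show (List.replicate b.length ((b.length : Int) - 1)).length + (j + 1)
            = b.length + 1 + j by simp; omega] at h0
      rw [h0, List.getD_cons_succ, getD_map_lt _ _ _ _ (by rw [len_mkEnd]; exact hjx)]
    rw [show b.length + 1 + j = j + (b.length + 1) by omega] at hsg heg ⊢
    rw [hsg, heg]
    have hv0 : 0 ≤ (mkStart xs).getD j 0 := by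
      rw [mkStart_eq_sTake]; exact sTake_nonneg xs xs.length j
    have hvj : (j : Int) ≤ (mkEnd xs).getD j 0 := by
      rw [mkEnd_eq_eRec]; exact eRec_ge xs j hjx
    have hsplitarr : b ++ x :: xs = (b ++ [x]) ++ xs := by simp
    have hplen : ((b ++ [x]).length : Int) = (b.length : Int) + 1 := by simp
    rw [show ((mkStart xs).getD j 0 + ((b.length : Int) + 1)
          + ((mkEnd xs).getD j 0 + ((b.length : Int) + 1)) - ((j + (b.length + 1) : Nat) : Int))
        = ((mkStart xs).getD j 0 + (mkEnd xs).getD j 0 - (j : Int)) + (((b ++ [x]).length : Nat) : Int) by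
          rw [hplen]; push_cast; ring,
        hsplitarr, pyGetD_append_shift _ _ _ (by omega)]

theorem mainN : ∀ N (arr : List Int), arr.length ≤ N → rev_sub1 arr = rev_sub1_alt arr := by
  intro N
  induction N with
  | zero =>
    intro arr h
    have : arr = [] := List.length_eq_zero_iff.mp (by omega)
    subst this
    rfl
  | succ N ih =>
    intro arr h
    have hsplit := List.takeWhile_append_dropWhile (p := fun z : Int => z % 2 == 0) (l := arr)
    have hbev : ∀ z ∈ arr.takeWhile (fun z : Int => z % 2 == 0), z % 2 = 0 := by
      intro z hz
      simpa using List.mem_takeWhile_imp hz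
    cases hdw : arr.dropWhile (fun z : Int => z % 2 == 0) with
    | nil =>
      have hall : ∀ z ∈ arr, z % 2 = 0 := by
        intro z hz
        rw [← hsplit, hdw, List.append_nil] at hz
        exact hbev z hz
      rw [A_eq_gAux, gAux_even arr hall [], alt_even arr hall]
      simp
    | cons x xs =>
      have hx : ¬ x % 2 = 0 := by
        have h1 := List.head_dropWhile_not (fun z : Int => z % 2 == 0) (l := arr) (by simp [hdw])
        simpa [hdw] using h1
      have harr : arr = arr.takeWhile (fun z : Int => z % 2 == 0) ++ x :: xs := by
        conv_lhs => rw [← hsplit, hdw]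
      have hlenxs : xs.length ≤ N := by
        have h2 := congrArg List.length harr
        simp only [List.length_append, List.length_cons] at h2
        omega
      rw [harr, A_eq_gAux]
      have h3 := gAux_evenPrefix _ hbev [] (x :: xs)
      rw [List.nil_append] at h3
      rw [h3, gAux_odd x xs _ hx, ← A_eq_gAux xs, ih xs hlenxs,
          alt_odd _ x xs hbev hx]

-- ===== VERDICT (by name: the statement is the Claim_ definition above) =====
theorem rev_sub1_spec : Claim_equal_rev_sub1 := by
  intro arr _
  unfold Spec_rev_sub1
  exact mainN arr.length arr (le_refl _)
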